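-- pv_equiv track=rewrite | github.com/llnl/RAJAPerf | scripts/benchmarking/study_run_kernels.py | _find_first_run
-- ===== SOURCE A (Python) =====
-- def _find_first_run(mask, min_len):
--     """Return the start index and run length of the first run of True with length >= min_len."""
--     run = 0
--     for i, v in enumerate(mask):
--         if v:
--             run += 1
--             if run >= min_len:
--                 start = i - run + 1
--                 j = i + 1
--                 while j < len(mask) and mask[j]:
--                     j += 1
--                 return start, j - start
--         else:
--             run = 0
--     return None, 0
-- ===== SOURCE B (Python) =====
-- def _find_first_run(mask, min_len):
--     """Two staged passes: first collect every maximal run of truthy values as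
--     (start, length), then return the first run whose length >= min_len."""
--     runs = []
--     start = None
--     for i, v in enumerate(mask):
--         if v:
--             if start is None:
--                 start = i
--         else:
--             if start is not None:
--                 runs.append((start, i - start))
--                 start = None
--     if start is not None:
--         runs.append((start, len(mask) - start))
--     for s, l in runs:
--         if l >= min_len:
--             return s, l
--     return None, 0
-- ===== Notes on version B (the rewrite author's own statement) =====
-- stated objective: alternative
-- what changed: B is a two-stage group-then-filter decomposition: one pass collects all maximal True runs as (start, length) pairs, a second pass returns the first pair with length >= min_len, instead of A's single-pass run counter that triggers mid-run and extends forward with an inner while.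
import Mathlib
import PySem

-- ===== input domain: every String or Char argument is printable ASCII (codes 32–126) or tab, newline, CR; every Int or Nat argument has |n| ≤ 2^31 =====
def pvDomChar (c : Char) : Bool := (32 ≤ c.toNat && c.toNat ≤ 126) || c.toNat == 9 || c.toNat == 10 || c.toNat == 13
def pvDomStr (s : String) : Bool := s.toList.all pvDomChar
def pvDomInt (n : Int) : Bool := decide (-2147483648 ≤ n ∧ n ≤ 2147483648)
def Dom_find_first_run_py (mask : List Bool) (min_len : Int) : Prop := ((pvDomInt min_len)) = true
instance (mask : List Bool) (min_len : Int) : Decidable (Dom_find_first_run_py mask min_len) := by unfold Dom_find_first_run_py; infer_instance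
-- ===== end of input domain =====

-- B is a two-stage decomposition (collect all maximal True runs, then pick the first
-- long enough) instead of A's single-pass counter with a forward-extending inner while.

-- ===== PORT A =====
-- inner `while j < len(mask) and mask[j]: j += 1` of A (fuel bounds the iteration count)
def pvAWhileF (mask : List Bool) : Nat → Nat → Nat
  | 0, j => j
  | f + 1, j =>
    if j < mask.length ∧ mask.getD j false = true then pvAWhileF mask f (j + 1) else j

def pvAWhile (mask : List Bool) (j : Nat) : Nat :=
  pvAWhileF mask (mask.length - j) j

-- the `for i, v in enumerate(mask)` loop of A, state: current suffix, index i, run counter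
def pvALoop (mask : List Bool) (min_len : Int) : List Bool → Nat → Int → Option Int × Int
  | [], _, _ => (none, 0)
  | v :: rest, i, run =>
    if v then
      let run' := run + 1
      if run' ≥ min_len then
        let start : Int := (i : Int) - run' + 1
        let j := pvAWhile mask (i + 1)
        (some start, (j : Int) - start)
      else pvALoop mask min_len rest (i + 1) run'
    else pvALoop mask min_len rest (i + 1) 0

def find_first_run_py (mask : List Bool) (min_len : Int) : Option Int × Int :=
  pvALoop mask min_len mask 0 0

-- ===== PORT B =====
-- stage 1 of B: the `for i, v in enumerate(mask)` loop collecting maximal True runs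
-- as (start, length) pairs, state: open-run start (`start` in Source B) and the `runs` list;
-- the `[]` case is Source B's trailing `if start is not None: runs.append(...)`
def pvBGather (n : Nat) : List Bool → Nat → Option Nat → List (Int × Int) → List (Int × Int)
  | [], _, start, runs =>
    match start with
    | some s => runs ++ [((s : Int), (n : Int) - (s : Int))]
    | none => runs
  | v :: rest, i, start, runs =>
    if v then
      match start with
      | none => pvBGather n rest (i + 1) (some i) runs
      | some s => pvBGather n rest (i + 1) (some s) runs
    else
      match start with
      | some s => pvBGather n rest (i + 1) none (runs ++ [((s : Int), (i : Int) - (s : Int))])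
      | none => pvBGather n rest (i + 1) none runs

-- stage 2 of B: `for s, l in runs: if l >= min_len: return s, l`
def pvBFind (min_len : Int) : List (Int × Int) → Option Int × Int
  | [] => (none, 0)
  | (s, l) :: rest => if l ≥ min_len then (some s, l) else pvBFind min_len rest

def find_first_run_py_alt (mask : List Bool) (min_len : Int) : Option Int × Int :=
  pvBFind min_len (pvBGather mask.length mask 0 none [])

-- ===== PRECONDITION & SPEC =====
def Spec_find_first_run_py (mask : List Bool) (min_len : Int) (out : Option Int × Int) : Prop := out = find_first_run_py_alt mask min_len
instance (mask : List Bool) (min_len : Int) (out : Option Int × Int) : Decidable (Spec_find_first_run_py mask min_len out) := by unfold Spec_find_first_run_py; infer_instance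

-- ===== CLAIM (what is proved, stated in full; the proofs are below) =====
def Claim_equal_find_first_run_py : Prop := ∀ (mask : List Bool) (min_len : Int), Dom_find_first_run_py mask min_len → Spec_find_first_run_py mask min_len (find_first_run_py mask min_len)

-- ===== LEMMAS AND PROOFS =====

-- length of the leading run of `true`
def pvCt : List Bool → Nat
  | true :: r => pvCt r + 1
  | _ => 0

theorem pvCt_le_length (l : List Bool) : pvCt l ≤ l.length := by
  induction l with
  | nil => simp [pvCt]
  | cons a r ih => cases a <;> simp [pvCt] <;> omega

-- reference function both ports are reduced to
def pvSpec (m : Int) : List Bool → Int → Option Int × Int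
  | [], _ => (none, 0)
  | false :: r, off => pvSpec m r (off + 1)
  | true :: r, off =>
    if ((pvCt r + 1 : Nat) : Int) ≥ m then (some off, ((pvCt r + 1 : Nat) : Int))
    else pvSpec m (r.drop (pvCt r)) (off + ((pvCt r + 1 : Nat) : Int))
termination_by l => l.length
decreasing_by
  · simp
  · have := pvCt_le_length r; simp

theorem pvCt_replicate_append (k : Nat) (t : List Bool) :
    pvCt (List.replicate k true ++ t) = k + pvCt t := by
  induction k with
  | zero => simp
  | succ n ih => simp [List.replicate_succ, pvCt, ih]; omega

theorem pvCt_replicate_append_false (k : Nat) (t : List Bool) :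
    pvCt (List.replicate k true ++ false :: t) = k := by
  have := pvCt_replicate_append k (false :: t)
  simpa [pvCt] using this

theorem pvDropRep (k : Nat) (t : List Bool) : (List.replicate k true ++ t).drop k = t := by
  induction k with
  | zero => simp
  | succ n ih => simpa [List.replicate_succ] using ih

-- A's fueled while computes: end of run = j + leading-true count of the suffix
theorem pvAWhileF_ct (mask : List Bool) (f j : Nat) (hf : mask.length - j ≤ f) :
    pvAWhileF mask f j = j + pvCt (mask.drop j) := by
  induction f generalizing j with
  | zero =>
    have hdrop : mask.drop j = [] := List.drop_eq_nil_of_le (by omega)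
    rw [pvAWhileF, hdrop]
    simp [pvCt]
  | succ f ih =>
    by_cases h : j < mask.length
    · have hdrop : mask.drop j = mask[j] :: mask.drop (j + 1) := List.drop_eq_getElem_cons h
      have hgd : mask.getD j false = mask[j] := List.getD_eq_getElem mask false h
      by_cases hv : mask[j] = true
      · rw [pvAWhileF, if_pos ⟨h, by rw [hgd, hv]⟩, ih (j + 1) (by omega), hdrop, hv]
        simp [pvCt]; omega
      · have hv' : mask[j] = false := by simpa using hv
        have hct : pvCt (mask.drop j) = 0 := by rw [hdrop, hv']; simp [pvCt]
        rw [pvAWhileF, if_neg (by rw [hgd, hv']; simp), hct]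
        omega
    · have hdrop : mask.drop j = [] := List.drop_eq_nil_of_le (by omega)
      rw [pvAWhileF, if_neg (by intro hc; omega), hdrop]
      simp [pvCt]

theorem pvAWhile_ct (mask : List Bool) (j : Nat) :
    pvAWhile mask j = j + pvCt (mask.drop j) :=
  pvAWhileF_ct mask (mask.length - j) j (le_refl _)

-- an unfinishable all-true block yields nothing
theorem pvSpec_replicate (m : Int) (r : Nat) (off : Int)
    (hr : r = 0 ∨ (r : Int) < m) :
    pvSpec m (List.replicate r true) off = (none, 0) := by
  cases r with
  | zero => simp [pvSpec]
  | succ n =>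
    have hct : pvCt (List.replicate n true) = n := by
      simpa using pvCt_replicate_append n []
    have hm : ¬ (((pvCt (List.replicate n true) + 1 : Nat) : Int) ≥ m) := by
      rcases hr with h | h
      · omega
      · push_cast at h; rw [hct]; push_cast; omega
    rw [List.replicate_succ, pvSpec, if_neg hm, hct]
    have hnil : (List.replicate n true).drop n = ([] : List Bool) := by simp
    rw [hnil, pvSpec]

-- a too-short completed true run followed by false is skipped wholesale
theorem pvSpec_run_false (m : Int) (r : Nat) (t : List Bool) (off : Int)
    (hr : r = 0 ∨ (r : Int) < m) :
    pvSpec m (List.replicate r true ++ false :: t) off = pvSpec m t (off + r + 1) := by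
  cases r with
  | zero => simp [pvSpec]
  | succ n =>
    have hct : pvCt (List.replicate n true ++ false :: t) = n :=
      pvCt_replicate_append_false n t
    have hm : ¬ (((pvCt (List.replicate n true ++ false :: t) + 1 : Nat) : Int) ≥ m) := by
      rcases hr with h | h
      · omega
      · push_cast at h; rw [hct]; push_cast; omega
    rw [List.replicate_succ, List.cons_append, pvSpec, if_neg hm, hct,
      pvDropRep n (false :: t), pvSpec]

theorem pvRepRot (r : Nat) (rest : List Bool) :
    List.replicate r true ++ true :: rest = true :: (List.replicate r true ++ rest) := by
  induction r with
  | zero => rfl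
  | succ k ih => simp only [List.replicate_succ, List.cons_append, ih]

-- main invariant for A's loop: with a pending true run of length r ending just before i,
-- A from (suffix, i, r) computes the reference value of the list rewound to the run start
theorem pvALoop_spec (mask : List Bool) (m : Int) (l : List Bool) (i r : Nat)
    (hdrop : mask.drop i = l) (hri : r ≤ i) (hr : r = 0 ∨ (r : Int) < m) :
    pvALoop mask m l i (r : Int) = pvSpec m (List.replicate r true ++ l) ((i : Int) - (r : Int)) := by
  induction l generalizing i r with
  | nil =>
    rw [pvALoop, List.append_nil, pvSpec_replicate m r _ hr]
  | cons v rest ih =>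
    have hilen : i < mask.length := by
      by_contra hc
      rw [List.drop_eq_nil_of_le (by omega)] at hdrop
      exact absurd hdrop (by simp)
    have hdrop' : mask.drop (i + 1) = rest := by
      have h1 : (mask.drop i).drop 1 = rest := by rw [hdrop]; rfl
      rw [List.drop_drop] at h1
      simpa [Nat.add_comm] using h1
    cases v with
    | false =>
      rw [pvALoop, if_neg (by simp)]
      have h0 := ih (i + 1) 0 hdrop' (by omega) (Or.inl rfl)
      simp only [Nat.cast_zero, List.replicate_zero, List.nil_append, sub_zero] at h0
      rw [h0, pvSpec_run_false m r rest _ hr]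
      congr 1
      all_goals (push_cast; try ring)
    | true =>
      have hrot : List.replicate r true ++ true :: rest
          = true :: (List.replicate r true ++ rest) := pvRepRot r rest
      by_cases hm : (r : Int) + 1 ≥ m
      · rw [pvALoop]
        simp only [if_pos hm]
        have hw : pvAWhile mask (i + 1) = (i + 1) + pvCt rest := by
          have h := pvAWhile_ct mask (i + 1)
          rw [hdrop'] at h; exact h
        have hge : ((r + pvCt rest + 1 : Nat) : Int) ≥ m := by omega
        rw [hw, hrot, pvSpec, pvCt_replicate_append r rest]
        have e2 : ((i + 1 + pvCt rest : Nat) : Int) - ((i : Int) - ((r : Int) + 1) + 1)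
            = ((r + pvCt rest + 1 : Nat) : Int) := by push_cast; ring
        have e1 : (i : Int) - ((r : Int) + 1) + 1 = (i : Int) - (r : Int) := by ring
        rw [e2, e1, if_pos hge]
        simp
      · rw [pvALoop]
        simp only [if_neg hm]
        have h1 := ih (i + 1) (r + 1) hdrop' (by omega) (Or.inr (by push_cast; omega))
        rw [show ((r : Int) + 1) = ((r + 1 : Nat) : Int) by push_cast; ring, h1]
        rw [show List.replicate (r + 1) true ++ rest = List.replicate r true ++ true :: rest by
          rw [List.replicate_succ', List.append_assoc, List.singleton_append]]
        all_goals (push_cast; try ring)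

-- the maximal True runs of a list, with their start offsets
def pvRuns : List Bool → Nat → List (Int × Int)
  | [], _ => []
  | false :: r, off => pvRuns r (off + 1)
  | true :: r, off =>
    ((off : Int), ((pvCt r + 1 : Nat) : Int)) :: pvRuns (r.drop (pvCt r)) (off + pvCt r + 1)
termination_by l => l.length
decreasing_by
  · simp
  · have := pvCt_le_length r; simp

-- the reference function is stage-2 search over the run list
theorem pvSpec_eq_find (m : Int) (l : List Bool) (off : Nat) :
    pvSpec m l (off : Int) = pvBFind m (pvRuns l off) := by
  induction hn : l.length using Nat.strong_induction_on generalizing l off with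
  | _ n ih =>
    match l with
    | [] => rw [pvSpec, pvRuns, pvBFind]
    | false :: r =>
      rw [pvSpec, pvRuns, show (off : Int) + 1 = ((off + 1 : Nat) : Int) by push_cast; ring]
      exact ih r.length (by simp [← hn]) r (off + 1) rfl
    | true :: r =>
      rw [pvSpec, pvRuns, pvBFind]
      by_cases hm : ((pvCt r + 1 : Nat) : Int) ≥ m
      · rw [if_pos hm, if_pos hm]
      · rw [if_neg hm, if_neg hm,
          show (off : Int) + ((pvCt r + 1 : Nat) : Int) = ((off + pvCt r + 1 : Nat) : Int) by
            push_cast; ring]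
        exact ih (r.drop (pvCt r)).length
          (by have := pvCt_le_length r; simp [← hn])
          (r.drop (pvCt r)) (off + pvCt r + 1) rfl

theorem pvRuns_replicate (r : Nat) (s : Nat) (hr : 1 ≤ r) :
    pvRuns (List.replicate r true) s = [((s : Int), (r : Int))] := by
  obtain ⟨k, rfl⟩ : ∃ k, r = k + 1 := ⟨r - 1, by omega⟩
  have hct : pvCt (List.replicate k true) = k := by
    simpa using pvCt_replicate_append k []
  rw [List.replicate_succ, pvRuns, hct]
  have hnil : (List.replicate k true).drop k = ([] : List Bool) := by simp
  rw [hnil, pvRuns]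

theorem pvRuns_run_false (r : Nat) (s : Nat) (t : List Bool) (hr : 1 ≤ r) :
    pvRuns (List.replicate r true ++ false :: t) s
      = ((s : Int), (r : Int)) :: pvRuns t (s + r + 1) := by
  obtain ⟨k, rfl⟩ : ∃ k, r = k + 1 := ⟨r - 1, by omega⟩
  have hct : pvCt (List.replicate k true ++ false :: t) = k :=
    pvCt_replicate_append_false k t
  rw [List.replicate_succ, List.cons_append, pvRuns, hct, pvDropRep k (false :: t), pvRuns,
    show s + k + 1 + 1 = s + (k + 1) + 1 by omega]

-- invariant for B's gathering pass: from index i with no open run, it appends the runs of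
-- the suffix; with an open run begun at s < i, it appends the runs of the suffix rewound
theorem pvBGather_spec (l : List Bool) (n i : Nat) (runs : List (Int × Int))
    (hn : i + l.length = n) :
    pvBGather n l i none runs = runs ++ pvRuns l i ∧
    ∀ s : Nat, s < i →
      pvBGather n l i (some s) runs = runs ++ pvRuns (List.replicate (i - s) true ++ l) s := by
  induction l generalizing i runs with
  | nil =>
    refine ⟨by rw [pvBGather, pvRuns]; simp, ?_⟩
    intro s hs
    rw [pvBGather, List.append_nil, pvRuns_replicate (i - s) s (by omega)]
    have hi : i = n := by simpa using hn
    have : (n : Int) - (s : Int) = ((i - s : Nat) : Int) := by omega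
    rw [this]
  | cons v rest ih =>
    have hn' : (i + 1) + rest.length = n := by simp at hn; omega
    have ih' := ih (i + 1) runs hn'
    cases v with
    | true =>
      constructor
      · rw [pvBGather, if_pos rfl]
        have h := ih'.2 i (by omega)
        simpa [pvRepRot] using h
      · intro s hs
        rw [pvBGather, if_pos rfl]
        have h := ih'.2 s (by omega)
        rw [h]
        congr 2
        rw [show i + 1 - s = (i - s) + 1 by omega, List.replicate_succ',
          List.append_assoc, List.singleton_append]
    | false =>
      constructor
      · rw [pvBGather, if_neg (by simp)]
        rw [(ih (i + 1) runs hn').1, pvRuns]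
      · intro s hs
        rw [pvBGather, if_neg (by simp)]
        rw [(ih (i + 1) (runs ++ [((s : Int), (i : Int) - (s : Int))]) hn').1]
        rw [pvRuns_run_false (i - s) s rest (by omega)]
        have e1 : (i : Int) - (s : Int) = ((i - s : Nat) : Int) := by omega
        have e2 : s + (i - s) + 1 = i + 1 := by omega
        rw [e1, e2, List.append_assoc, List.singleton_append]

-- ===== VERDICT (by name: the statement is the Claim_ definition above) =====
theorem find_first_run_py_spec : Claim_equal_find_first_run_py := by
  intro mask min_len _
  unfold Spec_find_first_run_py find_first_run_py find_first_run_py_alt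
  have hA := pvALoop_spec mask min_len mask 0 0 (by simp) (by omega) (Or.inl rfl)
  have hB := (pvBGather_spec mask mask.length 0 [] (by simp)).1
  simp only [Nat.cast_zero, List.replicate_zero, List.nil_append, sub_zero,
    List.nil_append] at hA hB
  rw [hA, hB]
  simpa using pvSpec_eq_find min_len mask 0
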